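-- pv_equiv track=rewrite | github.com/pulakshk/book-research-tool | execution/email_discovery_v2.py | pick
-- ===== SOURCE A (Python) =====
-- BAD = {"user@domain.com","email@example.com","noreply@google.com","support@goodreads.com"}
--
-- BAD_DOM = {"example.com","domain.com","email.com","test.com","sentry.io","wixpress.com",
--            "squarespace.com","wordpress.com","google.com","goodreads.com","amazon.com"}
--
-- def valid(e):
--     e = e.strip().lower()
--     return bool(e and "@" in e and e not in BAD and e.split("@")[-1] not in BAD_DOM)
--
-- def pick(emails, author=""):
--     v = [e for e in emails if valid(e)]
--     if not v: return ""
--     parts = [p.lower() for p in author.split() if len(p) > 2]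
--     for e in v:
--         local = e.split("@")[0].lower().replace(".","").replace("_","").replace("-","")
--         if any(p in local for p in parts): return e
--     generic = {"publicity","admin","press","media","info","contact","hello","office","support","newsletter"}
--     personal = [e for e in v if e.split("@")[0].lower() not in generic]
--     return personal[0] if personal else v[0]
-- ===== SOURCE B (Python) =====
-- BAD = {"user@domain.com","email@example.com","noreply@google.com","support@goodreads.com"}
--
-- BAD_DOM = {"example.com","domain.com","email.com","test.com","sentry.io","wixpress.com",
--            "squarespace.com","wordpress.com","google.com","goodreads.com","amazon.com"}
--
-- GENERIC = {"publicity","admin","press","media","info","contact","hello","office","support","newsletter"}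
--
-- def valid(e):
--     e = e.strip().lower()
--     return bool(e and "@" in e and e not in BAD and e.split("@")[-1] not in BAD_DOM)
--
-- def pick(emails, author=""):
--     parts = [p.lower() for p in author.split() if len(p) > 2]
--     first_personal = None
--     first_valid = None
--     for e in emails:
--         if not valid(e):
--             continue
--         raw = e.split("@")[0].lower()
--         cleaned = raw.replace(".", "").replace("_", "").replace("-", "")
--         if any(p in cleaned for p in parts):
--             return e
--         if first_personal is None and raw not in GENERIC:
--             first_personal = e
--         if first_valid is None:
--             first_valid = e
--     if first_personal is not None:
--         return first_personal
--     if first_valid is not None: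
--         return first_valid
--     return ""
-- ===== Notes on version B (the rewrite author's own statement) =====
-- stated objective: alternative
-- what changed: A builds the valid list and then runs an early-return match loop plus two post-hoc filter passes; B makes one left-to-right pass over the raw emails with two first-seen accumulators (first non-generic valid, first valid), returning the first author match immediately.
import Mathlib
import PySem

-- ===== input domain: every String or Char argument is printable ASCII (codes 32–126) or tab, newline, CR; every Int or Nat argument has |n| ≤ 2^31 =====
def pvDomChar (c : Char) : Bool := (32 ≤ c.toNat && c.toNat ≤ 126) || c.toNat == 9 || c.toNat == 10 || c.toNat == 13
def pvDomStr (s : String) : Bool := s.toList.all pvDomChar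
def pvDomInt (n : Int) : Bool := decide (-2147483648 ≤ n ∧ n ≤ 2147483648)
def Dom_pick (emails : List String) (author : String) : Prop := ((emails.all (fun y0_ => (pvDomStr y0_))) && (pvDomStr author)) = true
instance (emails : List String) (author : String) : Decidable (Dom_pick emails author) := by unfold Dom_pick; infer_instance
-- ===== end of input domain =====

-- B replaces A's staged passes (build the valid list, early-return loop, two post-filter
-- passes) by ONE left-to-right pass over the raw emails with two first-seen accumulators
-- (objective: alternative decomposition; same asymptotic cost).

-- ===== PORT A =====
-- module constants shared by both Pythons
def pvBAD : List String := ["user@domain.com","email@example.com","noreply@google.com","support@goodreads.com"]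
def pvBADDOM : List String := ["example.com","domain.com","email.com","test.com","sentry.io","wixpress.com",
  "squarespace.com","wordpress.com","google.com","goodreads.com","amazon.com"]
def pvGENERIC : List String := ["publicity","admin","press","media","info","contact","hello","office","support","newsletter"]

-- helper valid(e) (identical in both Pythons)
def pvValid (e : String) : Bool :=
  let s := PySem.Str.lower (PySem.Str.strip e)
  s != "" && PySem.Str.isIn "@" s && !(pvBAD.contains s) &&
    !(pvBADDOM.contains (((PySem.Str.split? s "@").getD []).getLastD ""))

-- e.split("@")[0].lower()
def pvRawLocal (e : String) : String :=
  PySem.Str.lower (((PySem.Str.split? e "@").getD []).headD "")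
-- .replace(".","").replace("_","").replace("-","")
def pvCleanLocal (e : String) : String :=
  PySem.Str.replace (PySem.Str.replace (PySem.Str.replace (pvRawLocal e) "." "") "_" "") "-" ""

-- any(p in cleaned for p in parts)
def pvMatch (parts : List String) (e : String) : Bool :=
  parts.any (fun p => PySem.Str.isIn p (pvCleanLocal e))

-- [p.lower() for p in author.split() if len(p) > 2]
def pvParts (author : String) : List String :=
  ((PySem.Str.split₀ author).filter (fun p => 2 < PySem.Str.len p)).map PySem.Str.lower

-- A's 'for e in v: … return e' loop
def pvLoop (parts : List String) : List String → Option String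
  | [] => none
  | e :: rest => if pvMatch parts e then some e else pvLoop parts rest

def pick (emails : List String) (author : String) : String :=
  let v := emails.filter pvValid
  match v with
  | [] => ""
  | _ :: _ =>
    match pvLoop (pvParts author) v with
    | some e => e
    | none =>
      match v.filter (fun e => !(pvGENERIC.contains (pvRawLocal e))) with
      | p :: _ => p
      | [] => v.headD ""

-- ===== PORT B =====
-- B's single pass: walk the raw emails once, skipping invalid entries, returning the
-- first author match immediately, remembering the first non-generic valid e-mail
-- (first_personal) and the first valid e-mail (first_valid) for the fallbacks.
def pickGo (parts : List String) : List String → Option String → Option String → String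
  | [], firstPersonal, firstValid =>
    match firstPersonal with
    | some p => p
    | none =>
      match firstValid with
      | some x => x
      | none => ""
  | e :: rest, firstPersonal, firstValid =>
    if pvValid e then
      if pvMatch parts e then e
      else
        let firstPersonal' :=
          match firstPersonal with
          | some _ => firstPersonal
          | none => if pvGENERIC.contains (pvRawLocal e) then none else some e
        let firstValid' :=
          match firstValid with
          | some _ => firstValid
          | none => some e
        pickGo parts rest firstPersonal' firstValid'
    else
      pickGo parts rest firstPersonal firstValid

def pick_alt (emails : List String) (author : String) : String :=
  pickGo (pvParts author) emails none none

-- ===== PRECONDITION & SPEC =====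
def Spec_pick (emails : List String) (author : String) (out : String) : Prop := out = pick_alt emails author
instance (emails : List String) (author : String) (out : String) : Decidable (Spec_pick emails author out) := by unfold Spec_pick; infer_instance

-- ===== CLAIM (what is proved, stated in full; the proofs are below) =====
def Claim_equal_pick : Prop := ∀ (emails : List String) (author : String), Dom_pick emails author → Spec_pick emails author (pick emails author)

-- ===== LEMMAS AND PROOFS =====

-- what A computes when the accumulators hold fp (first personal so far) and fv (first valid so far)
def pickAbs (parts : List String) (l : List String) (fp fv : Option String) : String :=
  match pvLoop parts (l.filter pvValid) with
  | some e => e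
  | none =>
    match fp with
    | some p => p
    | none =>
      match (l.filter pvValid).filter (fun e => !(pvGENERIC.contains (pvRawLocal e))) with
      | p :: _ => p
      | [] =>
        match fv with
        | some x => x
        | none => (l.filter pvValid).headD ""

-- invariant of B's single pass
theorem pickGo_eq_abs (parts : List String) :
    ∀ (l : List String) (fp fv : Option String),
      pickGo parts l fp fv = pickAbs parts l fp fv := by
  intro l
  induction l with
  | nil =>
    intro fp fv
    cases fp <;> cases fv <;> rfl
  | cons e rest ih =>
    intro fp fv
    by_cases hval : pvValid e
    · by_cases hm : pvMatch parts e
      · simp [pickGo, pickAbs, hval, hm, pvLoop, List.filter_cons]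
      · have hmf : pvMatch parts e = false := eq_false_of_ne_true hm
        have hfil : (e :: rest).filter pvValid = e :: rest.filter pvValid := by
          simp [List.filter_cons, hval]
        have hstep : pickGo parts (e :: rest) fp fv =
            pickGo parts rest
              (match fp with
               | some _ => fp
               | none => if pvGENERIC.contains (pvRawLocal e) then none else some e)
              (match fv with | some _ => fv | none => some e) := by
          simp [pickGo, hval, hmf]
        rw [hstep, ih]
        unfold pickAbs
        rw [hfil]
        simp only [pvLoop, hmf, if_false, List.filter_cons]
        cases hl : pvLoop parts (rest.filter pvValid) with
        | some x => rfl
        | none =>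
          cases fp with
          | some p => rfl
          | none =>
            by_cases hg : pvGENERIC.contains (pvRawLocal e)
            · simp only [hg, if_pos]
              simp only [Bool.not_true, Bool.false_eq_true, if_false]
              cases hper : rest.filter pvValid |>.filter (fun e => !(pvGENERIC.contains (pvRawLocal e))) with
              | cons p ps => rfl
              | nil => cases fv <;> rfl
            · have hgf : pvGENERIC.contains (pvRawLocal e) = false := eq_false_of_ne_true hg
              simp only [hgf, Bool.not_false, if_false, if_true, Bool.false_eq_true]
    · have hvf : pvValid e = false := eq_false_of_ne_true hval
      have : (e :: rest).filter pvValid = rest.filter pvValid := by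
        simp [List.filter_cons, hvf]
      simp [pickGo, hvf, ih, pickAbs, this]

-- A's result is the invariant instantiated at empty accumulators
theorem pick_eq_abs (emails : List String) (author : String) :
    pick emails author = pickAbs (pvParts author) emails none none := by
  unfold pick pickAbs
  cases hv : emails.filter pvValid with
  | nil => simp [pvLoop]
  | cons x t => simp

-- ===== VERDICT (by name: the statement is the Claim_ definition above) =====
theorem pick_spec : Claim_equal_pick := by
  intro emails author _
  unfold Spec_pick pick_alt
  rw [pickGo_eq_abs, pick_eq_abs]
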